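-- pv_equiv track=rewrite | github.com/liyangdeng/toy-setting-for-anchor-tokens | data/semantics_for_al/build_wordnet_synset_inventory.py | relations_for_nodes
-- ===== SOURCE A (Python) =====
-- from collections import Counter, defaultdict, deque
-- from typing import Any, Callable, Dict, Iterable, List, Optional, Sequence, Set, Tuple
--
-- def relations_for_nodes(
--     node_ids: Set[str],
--     edges: Iterable[Dict[str, str]],
-- ) -> Dict[str, Dict[str, List[str]]]:
--     relations: Dict[str, Dict[str, List[str]]] = {
--         sid: defaultdict(list)
--         for sid in node_ids
--     }
--     for edge in edges:
--         if edge["source"] in node_ids and edge["target"] in node_ids: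
--             relations[edge["source"]][edge["relation"]].append(edge["target"])
--
--     return {
--         sid: {
--             relation: sorted(targets)
--             for relation, targets in relation_map.items()
--         }
--         for sid, relation_map in relations.items()
--     }
-- ===== SOURCE B (Python) =====
-- def relations_for_nodes(node_ids, edges):
--     # declarative re-implementation: filter & project the edges once, then build
--     # each node's relation map by dedup + per-relation filtered sorted targets
--     kept = [
--         (e["source"], e["relation"], e["target"])
--         for e in edges
--         if e["source"] in node_ids and e["target"] in node_ids
--     ]
--     out = {}
--     for sid in node_ids:
--         mine = [(r, t) for s, r, t in kept if s == sid]
--         rels = list(dict.fromkeys(r for r, _ in mine))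
--         out[sid] = {r: sorted(t for rr, t in mine if rr == r) for r in rels}
--     return out
-- ===== Notes on version B (the rewrite author's own statement) =====
-- stated objective: alternative
-- what changed: A routes every edge through a pre-initialised nested defaultdict accumulator; B never builds an incremental dict: it filters and projects the edge list once into (source, relation, target) triples, then for each node derives its relation keys by ordered dedup (dict.fromkeys) and each target list by a per-relation filter followed by one sort.
import Mathlib
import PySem

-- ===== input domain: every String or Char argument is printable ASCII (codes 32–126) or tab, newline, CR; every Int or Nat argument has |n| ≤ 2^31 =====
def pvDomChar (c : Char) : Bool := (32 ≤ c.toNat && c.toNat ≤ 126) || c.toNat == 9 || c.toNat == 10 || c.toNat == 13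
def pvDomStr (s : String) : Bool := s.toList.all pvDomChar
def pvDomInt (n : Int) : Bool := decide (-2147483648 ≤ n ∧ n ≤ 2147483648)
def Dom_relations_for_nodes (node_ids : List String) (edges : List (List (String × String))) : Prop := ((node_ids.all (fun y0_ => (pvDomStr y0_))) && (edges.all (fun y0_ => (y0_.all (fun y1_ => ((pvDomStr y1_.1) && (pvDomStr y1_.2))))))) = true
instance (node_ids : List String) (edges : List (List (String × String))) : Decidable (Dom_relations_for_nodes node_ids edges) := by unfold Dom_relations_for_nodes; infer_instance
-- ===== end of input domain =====

-- B replaces A's single edge pass into a pre-initialised nested defaultdict by a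
-- declarative filter/project/dedup/sort pipeline with no incremental dict (alternative
-- decomposition, not faster).

-- ===== PORT A =====
-- one iteration of A's `for edge in edges` loop (edge dict lookups via PySem.Dict)
def pvAStep (node_ids : List String)
    (rel : PySem.Dict String (PySem.Dict String (List String)))
    (edge : List (String × String)) : PySem.Dict String (PySem.Dict String (List String)) :=
  let d := PySem.Dict.ofList edge
  if d.getD "source" "" ∈ node_ids ∧ d.getD "target" "" ∈ node_ids then
    rel.modify (d.getD "source" "") PySem.Dict.empty
      (fun inner => inner.modify (d.getD "relation" "") [] (fun ts => ts ++ [d.getD "target" ""]))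
  else rel

def relations_for_nodes (node_ids : List String) (edges : List (List (String × String))) : List (String × List (String × List String)) :=
  (edges.foldl (pvAStep node_ids)
    (node_ids.foldl (fun d sid => d.insert sid PySem.Dict.empty) PySem.Dict.empty)).items.map (fun p => (p.1, p.2.items.map (fun q => (q.1, PySem.List.sorted q.2 (fun x => x) false))))

-- ===== PORT B =====
def relations_for_nodes_alt (node_ids : List String) (edges : List (List (String × String))) : List (String × List (String × List String)) :=
  let kept := (edges.filter (fun e =>
      decide ((PySem.Dict.ofList e).getD "source" "" ∈ node_ids) &&
      decide ((PySem.Dict.ofList e).getD "target" "" ∈ node_ids))).map (fun e =>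
        ((PySem.Dict.ofList e).getD "source" "",
         (PySem.Dict.ofList e).getD "relation" "",
         (PySem.Dict.ofList e).getD "target" ""))
  node_ids.map (fun sid =>
    let mine := (kept.filter (fun p => p.1 == sid)).map (fun p => p.2)
    let rels := PySem.List.dedup (mine.map (fun q => q.1))
    (sid, rels.map (fun r =>
      (r, PySem.List.sorted ((mine.filter (fun q => q.1 == r)).map (fun q => q.2)) (fun x => x) false))))

-- ===== PRECONDITION & SPEC =====
-- node_ids models a Python set, so it holds distinct elements (the type convention's Set
-- invariant); each edge dict must have the keys A actually reads ("source" always,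
-- "target" once the source is in node_ids, "relation" once both endpoints are) — on the
-- missing-key inputs Python A raises KeyError.
def Pre_relations_for_nodes (node_ids : List String) (edges : List (List (String × String))) : Prop :=
  node_ids.Nodup ∧
  ∀ e ∈ edges,
    (PySem.Dict.ofList e).contains "source" = true ∧
    ((PySem.Dict.ofList e).getD "source" "" ∈ node_ids → (PySem.Dict.ofList e).contains "target" = true) ∧
    ((PySem.Dict.ofList e).getD "source" "" ∈ node_ids ∧ (PySem.Dict.ofList e).getD "target" "" ∈ node_ids →
      (PySem.Dict.ofList e).contains "relation" = true)
instance (node_ids : List String) (edges : List (List (String × String))) : Decidable (Pre_relations_for_nodes node_ids edges) := by unfold Pre_relations_for_nodes; infer_instance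

def pvWitness_relations_for_nodes : List String × (List (List (String × String))) :=
  (["a", "b"], [[("source", "a"), ("target", "b"), ("relation", "r")], [("source", "z")]])

def Spec_relations_for_nodes (node_ids : List String) (edges : List (List (String × String))) (out : List (String × List (String × List String))) : Prop := out = relations_for_nodes_alt node_ids edges
instance (node_ids : List String) (edges : List (List (String × String))) (out : List (String × List (String × List String))) : Decidable (Spec_relations_for_nodes node_ids edges out) := by unfold Spec_relations_for_nodes; infer_instance

-- ===== CLAIM (what is proved, stated in full; the proofs are below) =====
def Claim_equal_relations_for_nodes : Prop := ∀ (node_ids : List String) (edges : List (List (String × String))), Dom_relations_for_nodes node_ids edges → Pre_relations_for_nodes node_ids edges → Spec_relations_for_nodes node_ids edges (relations_for_nodes node_ids edges)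

-- ===== LEMMAS AND PROOFS =====

-- proof-side view of A's loop restricted to one source sid
def pvPerSid (node_ids : List String) (sid : String)
    (m : PySem.Dict String (List String))
    (edge : List (String × String)) : PySem.Dict String (List String) :=
  let d := PySem.Dict.ofList edge
  if d.getD "source" "" = sid ∧ d.getD "target" "" ∈ node_ids then
    m.modify (d.getD "relation" "") [] (fun ts => ts ++ [d.getD "target" ""])
  else m

-- modifying a key s ∈ node_ids of a dict whose items are node_ids.map (sid, f sid)
theorem pv_items_modify {ν : Type} (node_ids : List String) (hnd : node_ids.Nodup)
    (f : String → ν) (d : PySem.Dict String ν)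
    (hd : d.items = node_ids.map (fun sid => (sid, f sid)))
    (s : String) (hs : s ∈ node_ids) (d0 : ν) (g : ν → ν) :
    (d.modify s d0 g).items = node_ids.map (fun sid => (sid, if sid = s then g (f s) else f sid)) := by
  have hkeys : d.keys = node_ids := by
    simp [PySem.Dict.keys, hd, List.map_map, Function.comp_def]
  have hmem : (s, f s) ∈ d.items := by
    rw [hd]; exact List.mem_map_of_mem hs
  have hget : d.getD s d0 = f s :=
    PySem.Dict.getD_of_mem_items d hmem (by rw [hkeys]; exact hnd) d0
  have hcont : d.contains s = true := by
    rw [PySem.Dict.contains_iff_mem_keys, hkeys]; exact hs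
  simp only [PySem.Dict.modify, PySem.Dict.insert, hcont, if_pos, hget, hd, List.map_map]
  apply List.map_congr_left
  intro sid _
  by_cases h : sid = s
  · subst h; simp
  · simp [h, beq_iff_eq]

-- main loop invariant: folding A's step over edges acts independently on every key
theorem pv_invariant (node_ids : List String) (hnd : node_ids.Nodup)
    (edges : List (List (String × String)))
    (f : String → PySem.Dict String (List String))
    (d : PySem.Dict String (PySem.Dict String (List String)))
    (hd : d.items = node_ids.map (fun sid => (sid, f sid))) :
    (edges.foldl (pvAStep node_ids) d).items
      = node_ids.map (fun sid => (sid, edges.foldl (pvPerSid node_ids sid) (f sid))) := by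
  induction edges generalizing f d with
  | nil => simpa using hd
  | cons e es ih =>
    simp only [List.foldl_cons]
    by_cases hc : (PySem.Dict.ofList e).getD "source" "" ∈ node_ids ∧
        (PySem.Dict.ofList e).getD "target" "" ∈ node_ids
    · have hstep : pvAStep node_ids d e
          = d.modify ((PySem.Dict.ofList e).getD "source" "") PySem.Dict.empty
              (fun inner => inner.modify ((PySem.Dict.ofList e).getD "relation" "") []
                (fun ts => ts ++ [(PySem.Dict.ofList e).getD "target" ""])) := by
        simp only [pvAStep, if_pos hc]
      rw [hstep]
      rw [ih (fun sid => if sid = (PySem.Dict.ofList e).getD "source" ""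
              then ((f ((PySem.Dict.ofList e).getD "source" "")).modify
                ((PySem.Dict.ofList e).getD "relation" "") []
                (fun ts => ts ++ [(PySem.Dict.ofList e).getD "target" ""]))
              else f sid) _
            (pv_items_modify node_ids hnd f d hd _ hc.1 _ _)]
      apply List.map_congr_left
      intro sid hsid
      have hb : pvPerSid node_ids sid (f sid) e
          = if sid = (PySem.Dict.ofList e).getD "source" ""
            then ((f ((PySem.Dict.ofList e).getD "source" "")).modify
              ((PySem.Dict.ofList e).getD "relation" "") []
              (fun ts => ts ++ [(PySem.Dict.ofList e).getD "target" ""]))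
            else f sid := by
        by_cases h : sid = (PySem.Dict.ofList e).getD "source" ""
        · simp only [pvPerSid, if_pos h, if_pos (And.intro h.symm hc.2)]
          rw [h]
        · simp only [pvPerSid, if_neg h]
          rw [if_neg]
          intro hcon
          exact h hcon.1.symm
      rw [hb]
    · have hstep : pvAStep node_ids d e = d := by
        simp only [pvAStep, if_neg hc]
      rw [hstep, ih f d hd]
      apply List.map_congr_left
      intro sid hsid
      have hb : pvPerSid node_ids sid (f sid) e = f sid := by
        simp only [pvPerSid]
        rw [if_neg]
        intro hcon
        exact hc ⟨hcon.1 ▸ hsid, hcon.2⟩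
      rw [hb]

-- A's initialisation loop builds the dict whose items list node_ids with empty inner dicts
theorem pv_init (node_ids : List String) (hnd : node_ids.Nodup) :
    (node_ids.foldl (fun d sid => d.insert sid PySem.Dict.empty) PySem.Dict.empty).items
      = node_ids.map (fun sid => (sid, (PySem.Dict.empty : PySem.Dict String (List String)))) := by
  have h := PySem.Dict.items_foldl_insert_fresh (l := node_ids) (k := fun a => a)
    (v := fun _ => (PySem.Dict.empty : PySem.Dict String (List String)))
    (d := PySem.Dict.empty)
    (by intro a _; simp [PySem.Dict.contains_empty]) (by simpa using hnd)
  simpa using h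

-- A's per-sid loop equals a plain modify-append fold over sid's (relation, target) pairs
theorem pv_perSid_eq_fold (node_ids : List String) (sid : String)
    (edges : List (List (String × String))) (m : PySem.Dict String (List String)) :
    edges.foldl (pvPerSid node_ids sid) m
      = ((edges.filter (fun e =>
            decide ((PySem.Dict.ofList e).getD "source" "" = sid) &&
            decide ((PySem.Dict.ofList e).getD "target" "" ∈ node_ids))).map (fun e =>
              ((PySem.Dict.ofList e).getD "relation" "",
               (PySem.Dict.ofList e).getD "target" ""))).foldl
          (fun m p => m.modify p.1 [] (fun ts => ts ++ [p.2])) m := by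
  induction edges generalizing m with
  | nil => rfl
  | cons e es ih =>
    by_cases hc : (PySem.Dict.ofList e).getD "source" "" = sid ∧
        (PySem.Dict.ofList e).getD "target" "" ∈ node_ids
    · simp only [List.foldl_cons, List.filter_cons, hc.1, hc.2, decide_true, Bool.and_self,
        if_pos, List.map_cons, pvPerSid]
      exact ih _
    · have hfalse : ((decide ((PySem.Dict.ofList e).getD "source" "" = sid)) &&
          (decide ((PySem.Dict.ofList e).getD "target" "" ∈ node_ids))) = false := by
        rw [Bool.and_eq_false_iff]
        by_cases h1 : (PySem.Dict.ofList e).getD "source" "" = sid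
        · right; simp only [decide_eq_false_iff_not]; exact fun h2 => hc ⟨h1, h2⟩
        · left; simp [h1]
      simp only [List.foldl_cons, List.filter_cons, hfalse, Bool.false_eq_true, if_neg,
        not_false_iff, pvPerSid, if_neg hc]
      exact ih m

-- the items of a modify-append fold from empty: keys in first-occurrence order,
-- each mapped to the in-order list of its second components
theorem pv_items_modify_fold (ps : List (String × String)) :
    (ps.foldl (fun m p => m.modify p.1 [] (fun ts => ts ++ [p.2]))
        (PySem.Dict.empty : PySem.Dict String (List String))).items
      = (PySem.List.dedup (ps.map (fun q => q.1))).map (fun r =>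
          (r, (ps.filter (fun q => q.1 == r)).map (fun q => q.2))) := by
  set D := ps.foldl (fun m p => m.modify p.1 [] (fun ts => ts ++ [p.2]))
      (PySem.Dict.empty : PySem.Dict String (List String)) with hD
  have hkeys : D.keys = PySem.List.dedup (ps.map (fun q => q.1)) := by
    rw [hD]
    have h := PySem.Dict.keys_foldl_modify_key (l := ps) (key := fun p => p.1)
      (d0 := ([] : List String)) (f := fun _ p => fun ts => ts ++ [p.2])
      (d := (PySem.Dict.empty : PySem.Dict String (List String)))
    rw [h]
    simp [PySem.Set.update, PySem.Set.ofList_eq_foldl, PySem.Dict.keys_empty]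
  have hnd : D.keys.Nodup := by
    rw [hkeys]; exact PySem.List.nodup_dedup _
  rw [PySem.Dict.items_eq_map_keys D hnd [], hkeys]
  apply List.map_congr_left
  intro r _
  congr 1
  rw [hD, PySem.Dict.getD_foldl_modify_append, PySem.Dict.getD_empty]
  simp

-- for sid ∈ node_ids, B's per-sid pair list equals A's per-sid filter
theorem pv_mine_eq (node_ids : List String) (sid : String) (hs : sid ∈ node_ids)
    (edges : List (List (String × String))) :
    (((edges.filter (fun e =>
        decide ((PySem.Dict.ofList e).getD "source" "" ∈ node_ids) &&
        decide ((PySem.Dict.ofList e).getD "target" "" ∈ node_ids))).map (fun e =>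
          ((PySem.Dict.ofList e).getD "source" "",
           (PySem.Dict.ofList e).getD "relation" "",
           (PySem.Dict.ofList e).getD "target" ""))).filter
        (fun p => p.1 == sid)).map (fun p => p.2)
      = (edges.filter (fun e =>
            decide ((PySem.Dict.ofList e).getD "source" "" = sid) &&
            decide ((PySem.Dict.ofList e).getD "target" "" ∈ node_ids))).map (fun e =>
              ((PySem.Dict.ofList e).getD "relation" "",
               (PySem.Dict.ofList e).getD "target" "")) := by
  rw [List.filter_map, List.filter_filter, List.map_map]
  apply congrArg (List.map _)
  apply List.filter_congr
  intro e _
  simp only [Function.comp]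
  by_cases h1 : (PySem.Dict.ofList e).getD "source" "" = sid
  · subst h1; simp [hs]
  · simp [h1]

-- ===== VERDICT (by name: the statement is the Claim_ definition above) =====
theorem relations_for_nodes_spec : Claim_equal_relations_for_nodes := by
  intro node_ids edges _ hpre
  unfold Spec_relations_for_nodes relations_for_nodes relations_for_nodes_alt
  rw [pv_invariant node_ids hpre.1 edges (fun _ => PySem.Dict.empty) _ (pv_init node_ids hpre.1)]
  rw [List.map_map]
  apply List.map_congr_left
  intro sid hsid
  simp only [Function.comp]
  rw [pv_perSid_eq_fold, pv_items_modify_fold, List.map_map, pv_mine_eq node_ids sid hsid]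
  rfl
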